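-- pv_equiv track=rewrite | github.com/Kayade00/ggggg | Cogs/forest.py | _extract_base_name
-- ===== SOURCE A (Python) =====
-- def _extract_base_name(pokemon_name):
--     """Extract base Pokemon name from full name"""
--     name = pokemon_name.strip().lower()
--
--     # Common prefixes to remove (event Pokemon, regional forms, etc.)
--     prefixes_to_remove = [
--         "sylvan", "verdant", "thorned", "twilight", "briar", "blooming", "spore",
--         "shadow", "mega", "gigantamax", "gmax", "primal", "origin", "zen", "therian",
--         "incarnate", "resolute", "ordinary", "pirouette", "aria", "step", "blade",
--         "shield", "crowned", "ice", "shadow rider", "ice rider", "rapid strike",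
--         "single strike", "white striped", "blue striped", "red striped", "orange",
--         "yellow", "green", "blue", "indigo", "violet", "roaming", "complete",
--         "10 percent", "50 percent", "power construct", "disguised", "busted",
--         "school", "solo", "meteor", "dawn wings", "dusk mane", "ultra",
--         "alolan", "galarian", "hisuian", "paldean", "kantonian", "johtonian"
--     ]
--
--     # Common suffixes to remove (forms, sizes, etc.)
--     suffixes_to_remove = [
--         "two segment", "three segment", "four segment", "droopy", "curly", "stretchy",
--         "plant", "sandy", "trash", "wash", "heat", "frost", "fan", "mow", "altered",
--         "origin", "land", "sky", "normal", "attack", "defense", "speed", "red",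
--         "blue", "yellow", "orange", "pink", "green", "violet", "indigo", "white",
--         "black", "brown", "gray", "grey", "silver", "gold", "copper", "steel",
--         "rock", "ground", "flying", "poison", "fighting", "psychic", "bug", "ghost",
--         "fire", "water", "grass", "electric", "ice", "dragon", "dark", "fairy",
--         "normal mode", "zen mode", "standard mode", "therian forme", "incarnate forme",
--         "male", "female", "size s", "size m", "size l", "size xl", "size xs",
--         "small", "medium", "large", "super size", "amped", "low key", "full belly",
--         "hangry", "gulping", "gorging", "noice", "antique", "phony", "crowned sword",
--         "crowned shield", "eternamax", "gigantamax factor", "dynamax factor"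
--     ]
--
--     # Split name into words
--     words = name.split()
--     if not words:
--         return name
--
--     # Remove prefixes
--     while words and any(words[0].startswith(prefix) or " ".join(words[:len(prefix.split())]) == prefix
--                        for prefix in prefixes_to_remove):
--         # Find the longest matching prefix
--         longest_match = 0
--         for prefix in prefixes_to_remove:
--             prefix_words = prefix.split()
--             if len(prefix_words) <= len(words):
--                 if " ".join(words[:len(prefix_words)]) == prefix:
--                     longest_match = max(longest_match, len(prefix_words))
--
--         if longest_match > 0:
--             words = words[longest_match:]
--         else:
--             break
--
--     # Remove suffixes
--     while words and any(" ".join(words[-len(suffix.split()):]) == suffix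
--                        for suffix in suffixes_to_remove):
--         # Find the longest matching suffix
--         longest_match = 0
--         for suffix in suffixes_to_remove:
--             suffix_words = suffix.split()
--             if len(suffix_words) <= len(words):
--                 if " ".join(words[-len(suffix_words):]) == suffix:
--                     longest_match = max(longest_match, len(suffix_words))
--
--         if longest_match > 0:
--             words = words[:-longest_match]
--         else:
--             break
--
--     # Return the base name
--     base_name = " ".join(words) if words else name
--     return base_name.strip()
-- ===== SOURCE B (Python) =====
-- _PREFIX_PHRASES = [
--     "sylvan", "verdant", "thorned", "twilight", "briar", "blooming", "spore",
--     "shadow", "mega", "gigantamax", "gmax", "primal", "origin", "zen", "therian",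
--     "incarnate", "resolute", "ordinary", "pirouette", "aria", "step", "blade",
--     "shield", "crowned", "ice", "shadow rider", "ice rider", "rapid strike",
--     "single strike", "white striped", "blue striped", "red striped", "orange",
--     "yellow", "green", "blue", "indigo", "violet", "roaming", "complete",
--     "10 percent", "50 percent", "power construct", "disguised", "busted",
--     "school", "solo", "meteor", "dawn wings", "dusk mane", "ultra",
--     "alolan", "galarian", "hisuian", "paldean", "kantonian", "johtonian"
-- ]
--
-- _SUFFIX_PHRASES = [
--     "two segment", "three segment", "four segment", "droopy", "curly", "stretchy",
--     "plant", "sandy", "trash", "wash", "heat", "frost", "fan", "mow", "altered",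
--     "origin", "land", "sky", "normal", "attack", "defense", "speed", "red",
--     "blue", "yellow", "orange", "pink", "green", "violet", "indigo", "white",
--     "black", "brown", "gray", "grey", "silver", "gold", "copper", "steel",
--     "rock", "ground", "flying", "poison", "fighting", "psychic", "bug", "ghost",
--     "fire", "water", "grass", "electric", "ice", "dragon", "dark", "fairy",
--     "normal mode", "zen mode", "standard mode", "therian forme", "incarnate forme",
--     "male", "female", "size s", "size m", "size l", "size xl", "size xs",
--     "small", "medium", "large", "super size", "amped", "low key", "full belly",
--     "hangry", "gulping", "gorging", "noice", "antique", "phony", "crowned sword",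
--     "crowned shield", "eternamax", "gigantamax factor", "dynamax factor"
-- ]
--
--
-- def _group_by_word_count(phrases):
--     """Map word count -> set of phrases with that many words."""
--     groups = {}
--     for phrase in phrases:
--         groups.setdefault(len(phrase.split()), set()).add(phrase)
--     return groups
--
--
-- _PREFIX_GROUPS = _group_by_word_count(_PREFIX_PHRASES)
-- _SUFFIX_GROUPS = _group_by_word_count(_SUFFIX_PHRASES)
-- _PREFIX_MAX = max(_PREFIX_GROUPS)
-- _SUFFIX_MAX = max(_SUFFIX_GROUPS)
--
--
-- def _extract_base_name(pokemon_name):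
--     """Extract base Pokemon name from full name"""
--     name = pokemon_name.strip().lower()
--
--     words = name.split()
--     if not words:
--         return name
--
--     # Strip known prefix phrases, longest first.
--     while words:
--         for L in range(min(_PREFIX_MAX, len(words)), 0, -1):
--             if " ".join(words[:L]) in _PREFIX_GROUPS.get(L, set()):
--                 words = words[L:]
--                 break
--         else:
--             break
--
--     # Strip known suffix phrases, longest first.
--     while words:
--         for L in range(min(_SUFFIX_MAX, len(words)), 0, -1):
--             if " ".join(words[-L:]) in _SUFFIX_GROUPS.get(L, set()):
--                 words = words[:-L]
--                 break
--         else: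
--             break
--
--     base_name = " ".join(words) if words else name
--     return base_name.strip()
-- ===== Notes on version B (the rewrite author's own statement) =====
-- stated objective: alternative
-- what changed: Instead of re-scanning the whole prefix/suffix phrase lists with any() and then again with a max-tracking inner loop on every while-iteration (including a dead startswith disjunct), B precomputes dicts mapping word count -> set of phrases and per iteration probes just the longest window first (L = 2, then 1) with set membership; it trades the O(p) phrase scans per removal for two set lookups.
import Mathlib
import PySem

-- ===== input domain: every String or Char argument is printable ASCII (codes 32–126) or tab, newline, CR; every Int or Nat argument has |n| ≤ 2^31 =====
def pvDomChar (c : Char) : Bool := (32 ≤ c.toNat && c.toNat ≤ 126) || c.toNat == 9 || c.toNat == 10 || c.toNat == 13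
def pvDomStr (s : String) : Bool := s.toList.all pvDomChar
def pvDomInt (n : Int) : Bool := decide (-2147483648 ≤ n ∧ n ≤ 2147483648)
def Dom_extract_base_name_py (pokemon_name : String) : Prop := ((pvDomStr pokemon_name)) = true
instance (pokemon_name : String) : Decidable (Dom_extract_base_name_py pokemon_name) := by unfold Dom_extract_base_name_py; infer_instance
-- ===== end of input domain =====

-- B replaces A's two any()+max-scan while-loops by dicts mapping word count -> set of phrases,
-- trying the longest window first (objective: alternative algorithm, same exact return value).

-- ===== PORT A =====

def pvPrefixes : List String := [
  "sylvan", "verdant", "thorned", "twilight", "briar", "blooming", "spore",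
  "shadow", "mega", "gigantamax", "gmax", "primal", "origin", "zen", "therian",
  "incarnate", "resolute", "ordinary", "pirouette", "aria", "step", "blade",
  "shield", "crowned", "ice", "shadow rider", "ice rider", "rapid strike",
  "single strike", "white striped", "blue striped", "red striped", "orange",
  "yellow", "green", "blue", "indigo", "violet", "roaming", "complete",
  "10 percent", "50 percent", "power construct", "disguised", "busted",
  "school", "solo", "meteor", "dawn wings", "dusk mane", "ultra",
  "alolan", "galarian", "hisuian", "paldean", "kantonian", "johtonian"]

def pvSuffixes : List String := [
  "two segment", "three segment", "four segment", "droopy", "curly", "stretchy",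
  "plant", "sandy", "trash", "wash", "heat", "frost", "fan", "mow", "altered",
  "origin", "land", "sky", "normal", "attack", "defense", "speed", "red",
  "blue", "yellow", "orange", "pink", "green", "violet", "indigo", "white",
  "black", "brown", "gray", "grey", "silver", "gold", "copper", "steel",
  "rock", "ground", "flying", "poison", "fighting", "psychic", "bug", "ghost",
  "fire", "water", "grass", "electric", "ice", "dragon", "dark", "fairy",
  "normal mode", "zen mode", "standard mode", "therian forme", "incarnate forme",
  "male", "female", "size s", "size m", "size l", "size xl", "size xs",
  "small", "medium", "large", "super size", "amped", "low key", "full belly",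
  "hangry", "gulping", "gorging", "noice", "antique", "phony", "crowned sword",
  "crowned shield", "eternamax", "gigantamax factor", "dynamax factor"]

-- `words and any(words[0].startswith(prefix) or " ".join(words[:len(prefix.split())]) == prefix ...)`
-- (`words[0]` is only reached under the `words` guard, hence the match).
def pvAPrefCond (words : List String) : Bool :=
  match words with
  | [] => false
  | w0 :: rest => pvPrefixes.any (fun pre =>
      PySem.Str.startswith w0 pre ||
      (PySem.Str.join " " (PySem.List.slice (w0 :: rest) none
          (some ((PySem.Str.split₀ pre).length : Int))) == pre))

-- the prefix-loop body: longest_match, a running max over all exactly matching prefixes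
def pvAPrefLongest (words : List String) : Nat :=
  pvPrefixes.foldl (fun lm pre =>
    if (PySem.Str.split₀ pre).length ≤ words.length then
      if PySem.Str.join " " (PySem.List.slice words none
          (some ((PySem.Str.split₀ pre).length : Int))) == pre then
        max lm (PySem.Str.split₀ pre).length
      else lm
    else lm) 0

-- the `while` prefix loop: words = words[longest_match:] while a match is found
def pvAPrefLoop (words : List String) : List String :=
  if _h : pvAPrefCond words = true then
    if hlm : 0 < pvAPrefLongest words then
      pvAPrefLoop (PySem.List.slice words (some ((pvAPrefLongest words : Nat) : Int)) none)
    else words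
  else words
  termination_by words.length
  decreasing_by
    rw [PySem.List.slice_from_natCast]
    cases words with
    | nil => simp [pvAPrefCond] at _h
    | cons a l => simp only [List.length_drop]; simp only [List.length_cons]; omega

-- `words and any(" ".join(words[-len(suffix.split()):]) == suffix ...)`
def pvASufCond (words : List String) : Bool :=
  match words with
  | [] => false
  | w0 :: rest => pvSuffixes.any (fun sfx =>
      PySem.Str.join " " (PySem.List.slice (w0 :: rest)
          (some (-((PySem.Str.split₀ sfx).length : Int))) none) == sfx)

def pvASufLongest (words : List String) : Nat :=
  pvSuffixes.foldl (fun lm sfx =>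
    if (PySem.Str.split₀ sfx).length ≤ words.length then
      if PySem.Str.join " " (PySem.List.slice words
          (some (-((PySem.Str.split₀ sfx).length : Int))) none) == sfx then
        max lm (PySem.Str.split₀ sfx).length
      else lm
    else lm) 0

-- the `while` suffix loop: words = words[:-longest_match] while a match is found
def pvASufLoop (words : List String) : List String :=
  if _h : pvASufCond words = true then
    if hlm : 0 < pvASufLongest words then
      pvASufLoop (PySem.List.slice words none (some (-((pvASufLongest words : Nat) : Int))))
    else words
  else words
  termination_by words.length
  decreasing_by
    rw [PySem.List.slice_to_neg_natCast _ _ hlm]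
    cases words with
    | nil => simp [pvASufCond] at _h
    | cons a l => simp only [List.length_take, List.length_cons]; omega

def extract_base_name_py (pokemon_name : String) : String :=
  let name := PySem.Str.lower (PySem.Str.strip pokemon_name)
  let words := PySem.Str.split₀ name
  if words.isEmpty then name
  else
    let words1 := pvAPrefLoop words
    let words2 := pvASufLoop words1
    let base_name := if words2.isEmpty then name else PySem.Str.join " " words2
    PySem.Str.strip base_name

-- ===== PORT B =====

-- `groups.setdefault(len(phrase.split()), set()).add(phrase)` over all phrases
def pvGroupByWordCount (phrases : List String) : PySem.Dict Int (PySem.Set String) :=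
  phrases.foldl (fun groups phrase =>
    let k : Int := ((PySem.Str.split₀ phrase).length : Int)
    let groups' := groups.setdefault k (PySem.Set.ofList [])
    groups'.insert k (PySem.Set.add (groups'.getD k (PySem.Set.ofList [])) phrase))
    PySem.Dict.empty

def pvPrefixGroups : PySem.Dict Int (PySem.Set String) := pvGroupByWordCount pvPrefixes
def pvSuffixGroups : PySem.Dict Int (PySem.Set String) := pvGroupByWordCount pvSuffixes

-- `max(_PREFIX_GROUPS)` / `max(_SUFFIX_GROUPS)`: max over the dict's keys; the dicts are
-- nonempty literals, so the `.getD 0` (max() of empty, a ValueError) arm is unreachable.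
def pvPrefixMax : Int := (PySem.List.max? pvPrefixGroups.keys (fun k => k)).getD 0
def pvSuffixMax : Int := (PySem.List.max? pvSuffixGroups.keys (fun k => k)).getD 0

-- the `for L in range(min(_PREFIX_MAX, len(words)), 0, -1): ... break / else:` search:
-- first window length L whose joined words are a known prefix phrase
def pvBFindPrefix (words : List String) : Option Int :=
  (PySem.List.pyRange (min pvPrefixMax (words.length : Int)) 0 (-1)).find?
    (fun L => (pvPrefixGroups.getD L (PySem.Set.ofList [])).contains
      (PySem.Str.join " " (PySem.List.slice words none (some L))))

def pvBFindSuffix (words : List String) : Option Int :=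
  (PySem.List.pyRange (min pvSuffixMax (words.length : Int)) 0 (-1)).find?
    (fun L => (pvSuffixGroups.getD L (PySem.Set.ofList [])).contains
      (PySem.Str.join " " (PySem.List.slice words (some (-L)) none)))

-- `while words: ... words = words[L:] ... else: break`
set_option maxRecDepth 4096 in
def pvBPrefLoop (words : List String) : List String :=
  if _hw : words.isEmpty = true then words
  else
    match hf : pvBFindPrefix words with
    | some L => pvBPrefLoop (PySem.List.slice words (some L) none)
    | none => words
  termination_by words.length
  decreasing_by
    have hm := List.mem_of_find?_eq_some hf
    rw [PySem.List.mem_pyRange_neg_one] at hm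
    have h2 : L ≤ (words.length : Int) := le_trans hm.2 (min_le_right _ _)
    rw [PySem.List.slice_from _ (le_of_lt hm.1)]
    cases words with
    | nil => simp at _hw
    | cons a l => simp only [List.length_drop, List.length_cons]; omega

-- `while words: ... words = words[:-L] ... else: break`
set_option maxRecDepth 4096 in
def pvBSufLoop (words : List String) : List String :=
  if _hw : words.isEmpty = true then words
  else
    match hf : pvBFindSuffix words with
    | some L => pvBSufLoop (PySem.List.slice words none (some (-L)))
    | none => words
  termination_by words.length
  decreasing_by
    have hm := List.mem_of_find?_eq_some hf
    rw [PySem.List.mem_pyRange_neg_one] at hm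
    have hL : -L = -((L.toNat : Nat) : Int) := by omega
    rw [hL, PySem.List.slice_to_neg_natCast _ _ (by omega : 0 < L.toNat)]
    cases words with
    | nil => simp at _hw
    | cons a l => simp only [List.length_take, List.length_cons]; omega

def extract_base_name_py_alt (pokemon_name : String) : String :=
  let name := PySem.Str.lower (PySem.Str.strip pokemon_name)
  let words := PySem.Str.split₀ name
  if words.isEmpty then name
  else
    let words1 := pvBPrefLoop words
    let words2 := pvBSufLoop words1
    let base_name := if words2.isEmpty then name else PySem.Str.join " " words2
    PySem.Str.strip base_name

-- ===== PRECONDITION & SPEC =====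
def Spec_extract_base_name_py (pokemon_name : String) (out : String) : Prop := out = extract_base_name_py_alt pokemon_name
instance (pokemon_name : String) (out : String) : Decidable (Spec_extract_base_name_py pokemon_name out) := by unfold Spec_extract_base_name_py; infer_instance

-- ===== CLAIM (what is proved, stated in full; the proofs are below) =====
def Claim_equal_extract_base_name_py : Prop := ∀ (pokemon_name : String), Dom_extract_base_name_py pokemon_name → Spec_extract_base_name_py pokemon_name (extract_base_name_py pokemon_name)

-- ===== LEMMAS AND PROOFS =====

-- abbreviations for the two window joins and the grouped-set membership tests
def pvJoinTake (words : List String) (k : Nat) : String :=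
  PySem.Str.join " " (PySem.List.slice words none (some (k : Int)))
def pvJoinTail (words : List String) (k : Nat) : String :=
  PySem.Str.join " " (PySem.List.slice words (some (-(k : Int))) none)
def pvHasPre (words : List String) (k : Nat) : Bool :=
  (pvPrefixGroups.getD (k : Int) (PySem.Set.ofList [])).contains (pvJoinTake words k)
def pvHasSuf (words : List String) (k : Nat) : Bool :=
  (pvSuffixGroups.getD (k : Int) (PySem.Set.ofList [])).contains (pvJoinTail words k)

-- a running max with accumulator a equals max a (running max from 0)
lemma pv_foldl_max_acc (c : String → Bool) (n : String → Nat) (l : List String) (a : Nat) :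
    l.foldl (fun lm p => if c p then max lm (n p) else lm) a
      = max a (l.foldl (fun lm p => if c p then max lm (n p) else lm) 0) := by
  induction l generalizing a with
  | nil => simp
  | cons p l ih =>
    simp only [List.foldl_cons]
    rw [ih, ih (if c p then max 0 (n p) else 0)]
    by_cases h : c p <;> simp [h]

-- when every candidate length is 1 or 2, the running max is the if-chain "2 first, then 1"
lemma pv_best_two (c : String → Bool) (n : String → Nat) (l : List String)
    (h : ∀ p ∈ l, n p = 1 ∨ n p = 2) :
    l.foldl (fun lm p => if c p then max lm (n p) else lm) 0
      = (if l.any (fun p => (n p == 2) && c p) then 2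
         else if l.any (fun p => (n p == 1) && c p) then 1 else 0) := by
  induction l with
  | nil => simp
  | cons p l ih =>
    simp only [List.foldl_cons, List.any_cons]
    rw [pv_foldl_max_acc, ih (fun q hq => h q (List.mem_cons_of_mem _ hq))]
    rcases h p (List.mem_cons_self ..) with h1 | h1 <;> by_cases hc : c p <;>
      simp [h1, hc] <;> split_ifs <;> simp_all

-- the grouping fold, at key k, collects exactly the phrases with k words
lemma pv_getD_group (l : List String) (d : PySem.Dict Int (PySem.Set String)) (k : Int) :
    ((l.foldl (fun groups phrase =>
        let kk : Int := ((PySem.Str.split₀ phrase).length : Int)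
        let groups' := groups.setdefault kk (PySem.Set.ofList [])
        groups'.insert kk (PySem.Set.add (groups'.getD kk (PySem.Set.ofList [])) phrase)) d).getD
      k (PySem.Set.ofList []))
    = (l.filter (fun p => (((PySem.Str.split₀ p).length : Int) == k))).foldl
        (fun s p => s.add p) (d.getD k (PySem.Set.ofList [])) := by
  induction l generalizing d with
  | nil => simp
  | cons p l ih =>
    simp only [List.foldl_cons, List.filter_cons]
    rw [ih]
    by_cases hk : (((PySem.Str.split₀ p).length : Int) = k)
    · simp only [hk, beq_self_eq_true, if_true, List.foldl_cons]
      congr 1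
      rw [PySem.Dict.getD_insert, if_pos rfl, PySem.Dict.getD_setdefault_self]
    · have hbk : (((PySem.Str.split₀ p).length : Int) == k) = false := by
        simpa using hk
      simp only [hbk, Bool.false_eq_true, if_false]
      congr 1
      rw [PySem.Dict.getD_insert, if_neg (fun hh => hk hh.symm),
        PySem.Dict.getD_eq_get?_getD,
        PySem.Dict.get?_setdefault_of_ne _ _ (fun hh => hk hh.symm),
        ← PySem.Dict.getD_eq_get?_getD]

-- membership in the grouped set at word count k, as an `any` over the phrase list
lemma pv_group_contains (l : List String) (k : Nat) (s : String) :
    ((pvGroupByWordCount l).getD (k : Int) (PySem.Set.ofList [])).contains s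
      = l.any (fun p => ((PySem.Str.split₀ p).length == k) && (s == p)) := by
  have hg : pvGroupByWordCount l
      = l.foldl (fun groups phrase =>
        let kk : Int := ((PySem.Str.split₀ phrase).length : Int)
        let groups' := groups.setdefault kk (PySem.Set.ofList [])
        groups'.insert kk (PySem.Set.add (groups'.getD kk (PySem.Set.ofList [])) phrase))
        PySem.Dict.empty := rfl
  rw [hg, pv_getD_group, PySem.Dict.getD_empty, Bool.eq_iff_iff]
  have hmem := PySem.Set.mem_foldl_add
    (l := l.filter (fun p => (((PySem.Str.split₀ p).length : Int) == (k : Int))))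
    (f := fun (x : String) => x)
    (s := PySem.Set.ofList ([] : List String)) (y := s)
  simp only [List.any_eq_true, Bool.and_eq_true, beq_iff_eq]
  constructor
  · intro hin
    rcases hmem.mp (List.contains_iff_mem.mp hin) with h0 | ⟨b, hb, hsb⟩
    · exact absurd ((PySem.Set.mem_ofList [] s).mp h0) (by simp)
    · rcases List.mem_filter.mp hb with ⟨hbl, hbk⟩
      refine ⟨b, hbl, ?_, hsb⟩
      exact_mod_cast (beq_iff_eq.mp hbk)
  · rintro ⟨p, hp, hk, hs⟩
    refine List.contains_iff_mem.mpr (hmem.mpr (Or.inr ⟨p, List.mem_filter.mpr ⟨hp, ?_⟩, hs⟩))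
    exact beq_iff_eq.mpr (by exact_mod_cast hk)

-- pull the window length k out of the `any` when the per-phrase length is pinned to k
lemma pv_any_k (l : List String) (w : Nat → String) (len k : Nat) :
    l.any (fun p => ((PySem.Str.split₀ p).length == k) &&
        (decide ((PySem.Str.split₀ p).length ≤ len) && (w (PySem.Str.split₀ p).length == p)))
      = (decide (k ≤ len) && l.any (fun p => ((PySem.Str.split₀ p).length == k) && (w k == p))) := by
  rw [Bool.eq_iff_iff]
  simp only [List.any_eq_true, Bool.and_eq_true, beq_iff_eq, decide_eq_true_eq]
  constructor
  · rintro ⟨p, hp, hk, hle, hw⟩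
    exact ⟨hk ▸ hle, p, hp, hk, hk ▸ hw⟩
  · rintro ⟨hle, p, hp, hk, hw⟩
    exact ⟨p, hp, hk, by rw [hk]; exact hle, by rw [hk]; exact hw⟩

-- every phrase has one or two words (concrete check on the literal lists)
lemma pv_pref_len (p : String) (hp : p ∈ pvPrefixes) :
    (PySem.Str.split₀ p).length = 1 ∨ (PySem.Str.split₀ p).length = 2 := by
  have hall : pvPrefixes.all
      (fun p => ((PySem.Str.split₀ p).length == 1 || (PySem.Str.split₀ p).length == 2)) = true := by
    decide
  rw [List.all_eq_true] at hall
  have := hall p hp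
  simpa using this

lemma pv_suf_len (p : String) (hp : p ∈ pvSuffixes) :
    (PySem.Str.split₀ p).length = 1 ∨ (PySem.Str.split₀ p).length = 2 := by
  have hall : pvSuffixes.all
      (fun p => ((PySem.Str.split₀ p).length == 1 || (PySem.Str.split₀ p).length == 2)) = true := by
    decide
  rw [List.all_eq_true] at hall
  have := hall p hp
  simpa using this

-- A's longest_match, characterised through the grouped sets
lemma pv_pref_longest_char (words : List String) :
    pvAPrefLongest words
      = (if decide (2 ≤ words.length) && pvHasPre words 2 then 2
         else if decide (1 ≤ words.length) && pvHasPre words 1 then 1 else 0) := by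
  have hfun :
      (fun (lm : Nat) (pre : String) =>
          if (PySem.Str.split₀ pre).length ≤ words.length then
            if PySem.Str.join " " (PySem.List.slice words none
                (some ((PySem.Str.split₀ pre).length : Int))) == pre then
              max lm (PySem.Str.split₀ pre).length
            else lm
          else lm)
        = (fun (lm : Nat) (p : String) =>
            if (decide ((PySem.Str.split₀ p).length ≤ words.length) &&
                ((fun (k : Nat) => PySem.Str.join " " (PySem.List.slice words none (some (k : Int))))
                  (PySem.Str.split₀ p).length == p)) = true then
              max lm (PySem.Str.split₀ p).length
            else lm) := by
    funext lm p
    by_cases h1 : (PySem.Str.split₀ p).length ≤ words.length <;>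
      by_cases h2 : (PySem.Str.join " " (PySem.List.slice words none
          (some ((PySem.Str.split₀ p).length : Int))) == p) = true <;>
      simp [h1, h2]
  unfold pvAPrefLongest
  rw [hfun, pv_best_two _ _ _ (fun p hp => pv_pref_len p hp)]
  simp only [pv_any_k pvPrefixes
    (fun (k : Nat) => PySem.Str.join " " (PySem.List.slice words none (some (k : Int))))
    words.length]
  rw [← pv_group_contains pvPrefixes 2 _, ← pv_group_contains pvPrefixes 1 _]
  rfl

lemma pv_suf_longest_char (words : List String) :
    pvASufLongest words
      = (if decide (2 ≤ words.length) && pvHasSuf words 2 then 2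
         else if decide (1 ≤ words.length) && pvHasSuf words 1 then 1 else 0) := by
  have hfun :
      (fun (lm : Nat) (sfx : String) =>
          if (PySem.Str.split₀ sfx).length ≤ words.length then
            if PySem.Str.join " " (PySem.List.slice words
                (some (-((PySem.Str.split₀ sfx).length : Int))) none) == sfx then
              max lm (PySem.Str.split₀ sfx).length
            else lm
          else lm)
        = (fun (lm : Nat) (p : String) =>
            if (decide ((PySem.Str.split₀ p).length ≤ words.length) &&
                ((fun (k : Nat) => PySem.Str.join " " (PySem.List.slice words (some (-(k : Int))) none))
                  (PySem.Str.split₀ p).length == p)) = true then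
              max lm (PySem.Str.split₀ p).length
            else lm) := by
    funext lm p
    by_cases h1 : (PySem.Str.split₀ p).length ≤ words.length <;>
      by_cases h2 : (PySem.Str.join " " (PySem.List.slice words
          (some (-((PySem.Str.split₀ p).length : Int))) none) == p) = true <;>
      simp [h1, h2]
  unfold pvASufLongest
  rw [hfun, pv_best_two _ _ _ (fun p hp => pv_suf_len p hp)]
  simp only [pv_any_k pvSuffixes
    (fun (k : Nat) => PySem.Str.join " " (PySem.List.slice words (some (-(k : Int))) none))
    words.length]
  rw [← pv_group_contains pvSuffixes 2 _, ← pv_group_contains pvSuffixes 1 _]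
  rfl

set_option maxRecDepth 40000 in
lemma pv_prefix_max : pvPrefixMax = 2 := by decide

set_option maxRecDepth 40000 in
lemma pv_suffix_max : pvSuffixMax = 2 := by decide

-- B's for-else search finds exactly A's longest match
set_option maxRecDepth 40000 in
set_option maxHeartbeats 1000000 in
lemma pv_find_pref_char (words : List String) (h : words ≠ []) :
    pvBFindPrefix words
      = (if pvAPrefLongest words = 0 then none else some ((pvAPrefLongest words : Nat) : Int)) := by
  have hlen : 1 ≤ words.length := by
    cases words with
    | nil => exact absurd rfl h
    | cons a l => simp
  have e2 : ((pvPrefixGroups.getD (2 : Int) (PySem.Set.ofList [])).contains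
      (PySem.Str.join " " (PySem.List.slice words none (some (2 : Int))))) = pvHasPre words 2 := by
    simp only [pvHasPre, pvJoinTake]
    norm_num
  have e1 : ((pvPrefixGroups.getD (1 : Int) (PySem.Set.ofList [])).contains
      (PySem.Str.join " " (PySem.List.slice words none (some (1 : Int))))) = pvHasPre words 1 := by
    simp only [pvHasPre, pvJoinTake]
    norm_num
  rw [pv_pref_longest_char]
  unfold pvBFindPrefix
  rw [pv_prefix_max]
  by_cases h2 : 2 ≤ words.length
  · have hmin : min (2 : Int) (words.length : Int) = 2 := by omega
    rw [hmin, (by decide : PySem.List.pyRange 2 0 (-1) = [(2 : Int), 1])]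
    by_cases hp2 : pvHasPre words 2 <;> by_cases hp1 : pvHasPre words 1
    · have m2 := List.contains_iff_mem.mp (e2.trans hp2)
      simp [PySem.Set.ofList] at m2
      simp [m2, hp2, hp1, h2, hlen]
    · have m2 := List.contains_iff_mem.mp (e2.trans hp2)
      simp [PySem.Set.ofList] at m2
      simp [m2, hp2, hp1, h2, hlen]
    · have m2 : ¬ (PySem.Str.join " " (PySem.List.slice words none (some (2 : Int)))
          ∈ pvPrefixGroups.getD (2 : Int) ([] : PySem.Set String)) := fun hm =>
        hp2 (e2.symm.trans (List.contains_iff_mem.mpr (by simpa [PySem.Set.ofList] using hm)))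
      have m1 := List.contains_iff_mem.mp (e1.trans hp1)
      simp [PySem.Set.ofList] at m1
      simp [m2, m1, hp2, hp1, h2, hlen]
    · have m2 : ¬ (PySem.Str.join " " (PySem.List.slice words none (some (2 : Int)))
          ∈ pvPrefixGroups.getD (2 : Int) ([] : PySem.Set String)) := fun hm =>
        hp2 (e2.symm.trans (List.contains_iff_mem.mpr (by simpa [PySem.Set.ofList] using hm)))
      have m1 : ¬ (PySem.Str.join " " (PySem.List.slice words none (some (1 : Int)))
          ∈ pvPrefixGroups.getD (1 : Int) ([] : PySem.Set String)) := fun hm =>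
        hp1 (e1.symm.trans (List.contains_iff_mem.mpr (by simpa [PySem.Set.ofList] using hm)))
      simp [m2, m1, hp2, hp1, h2, hlen]
  · have hmin : min (2 : Int) (words.length : Int) = 1 := by omega
    rw [hmin, (by decide : PySem.List.pyRange 1 0 (-1) = [(1 : Int)])]
    by_cases hp1 : pvHasPre words 1
    · have m1 := List.contains_iff_mem.mp (e1.trans hp1)
      simp [PySem.Set.ofList] at m1
      simp [m1, hp1, h2, hlen]
    · have m1 : ¬ (PySem.Str.join " " (PySem.List.slice words none (some (1 : Int)))
          ∈ pvPrefixGroups.getD (1 : Int) ([] : PySem.Set String)) := fun hm =>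
        hp1 (e1.symm.trans (List.contains_iff_mem.mpr (by simpa [PySem.Set.ofList] using hm)))
      simp [m1, hp1, h2, hlen]

set_option maxRecDepth 40000 in
set_option maxHeartbeats 1000000 in
lemma pv_find_suf_char (words : List String) (h : words ≠ []) :
    pvBFindSuffix words
      = (if pvASufLongest words = 0 then none else some ((pvASufLongest words : Nat) : Int)) := by
  have hlen : 1 ≤ words.length := by
    cases words with
    | nil => exact absurd rfl h
    | cons a l => simp
  have e2 : ((pvSuffixGroups.getD (2 : Int) (PySem.Set.ofList [])).contains
      (PySem.Str.join " " (PySem.List.slice words (some (-(2 : Int))) none))) = pvHasSuf words 2 := by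
    simp only [pvHasSuf, pvJoinTail]
    norm_num
  have e1 : ((pvSuffixGroups.getD (1 : Int) (PySem.Set.ofList [])).contains
      (PySem.Str.join " " (PySem.List.slice words (some (-(1 : Int))) none))) = pvHasSuf words 1 := by
    simp only [pvHasSuf, pvJoinTail]
    norm_num
  rw [pv_suf_longest_char]
  unfold pvBFindSuffix
  rw [pv_suffix_max]
  by_cases h2 : 2 ≤ words.length
  · have hmin : min (2 : Int) (words.length : Int) = 2 := by omega
    rw [hmin, (by decide : PySem.List.pyRange 2 0 (-1) = [(2 : Int), 1])]
    by_cases hp2 : pvHasSuf words 2 <;> by_cases hp1 : pvHasSuf words 1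
    · have m2 := List.contains_iff_mem.mp (e2.trans hp2)
      simp [PySem.Set.ofList] at m2
      simp [m2, hp2, hp1, h2, hlen]
    · have m2 := List.contains_iff_mem.mp (e2.trans hp2)
      simp [PySem.Set.ofList] at m2
      simp [m2, hp2, hp1, h2, hlen]
    · have m2 : ¬ (PySem.Str.join " " (PySem.List.slice words (some (-(2 : Int))) none)
          ∈ pvSuffixGroups.getD (2 : Int) ([] : PySem.Set String)) := fun hm =>
        hp2 (e2.symm.trans (List.contains_iff_mem.mpr (by simpa [PySem.Set.ofList] using hm)))
      have m1 := List.contains_iff_mem.mp (e1.trans hp1)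
      simp [PySem.Set.ofList] at m1
      simp [m2, m1, hp2, hp1, h2, hlen]
    · have m2 : ¬ (PySem.Str.join " " (PySem.List.slice words (some (-(2 : Int))) none)
          ∈ pvSuffixGroups.getD (2 : Int) ([] : PySem.Set String)) := fun hm =>
        hp2 (e2.symm.trans (List.contains_iff_mem.mpr (by simpa [PySem.Set.ofList] using hm)))
      have m1 : ¬ (PySem.Str.join " " (PySem.List.slice words (some (-(1 : Int))) none)
          ∈ pvSuffixGroups.getD (1 : Int) ([] : PySem.Set String)) := fun hm =>
        hp1 (e1.symm.trans (List.contains_iff_mem.mpr (by simpa [PySem.Set.ofList] using hm)))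
      simp [m2, m1, hp2, hp1, h2, hlen]
  · have hmin : min (2 : Int) (words.length : Int) = 1 := by omega
    rw [hmin, (by decide : PySem.List.pyRange 1 0 (-1) = [(1 : Int)])]
    by_cases hp1 : pvHasSuf words 1
    · have m1 := List.contains_iff_mem.mp (e1.trans hp1)
      simp [PySem.Set.ofList] at m1
      simp [m1, hp1, h2, hlen]
    · have m1 : ¬ (PySem.Str.join " " (PySem.List.slice words (some (-(1 : Int))) none)
          ∈ pvSuffixGroups.getD (1 : Int) ([] : PySem.Set String)) := fun hm =>
        hp1 (e1.symm.trans (List.contains_iff_mem.mpr (by simpa [PySem.Set.ofList] using hm)))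
      simp [m1, hp1, h2, hlen]

-- a positive longest_match makes A's while-condition true
lemma pv_pref_cond_of_pos (words : List String) (h : 0 < pvAPrefLongest words) :
    pvAPrefCond words = true := by
  rw [pv_pref_longest_char] at h
  have hex : ∃ k : Nat, 0 < k ∧ k ≤ words.length ∧ pvHasPre words k = true := by
    split_ifs at h with hA hB
    · rcases Bool.and_eq_true_iff.mp hA with ⟨hA1, hA2⟩
      exact ⟨2, by omega, of_decide_eq_true hA1, hA2⟩
    · rcases Bool.and_eq_true_iff.mp hB with ⟨hB1, hB2⟩
      exact ⟨1, by omega, of_decide_eq_true hB1, hB2⟩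
    · omega
  obtain ⟨k, hk, hkle, hkP⟩ := hex
  unfold pvHasPre at hkP
  rw [show pvPrefixGroups = pvGroupByWordCount pvPrefixes from rfl,
    pv_group_contains, List.any_eq_true] at hkP
  obtain ⟨p, hpmem, hp⟩ := hkP
  rcases Bool.and_eq_true_iff.mp hp with ⟨hlenp, hjoin⟩
  cases words with
  | nil => simp at hkle; omega
  | cons w0 rest =>
    unfold pvAPrefCond
    rw [List.any_eq_true]
    refine ⟨p, hpmem, ?_⟩
    rw [Bool.or_eq_true]
    right
    rw [beq_iff_eq.mp hlenp]
    unfold pvJoinTake at hjoin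
    exact hjoin

lemma pv_suf_cond_of_pos (words : List String) (h : 0 < pvASufLongest words) :
    pvASufCond words = true := by
  rw [pv_suf_longest_char] at h
  have hex : ∃ k : Nat, 0 < k ∧ k ≤ words.length ∧ pvHasSuf words k = true := by
    split_ifs at h with hA hB
    · rcases Bool.and_eq_true_iff.mp hA with ⟨hA1, hA2⟩
      exact ⟨2, by omega, of_decide_eq_true hA1, hA2⟩
    · rcases Bool.and_eq_true_iff.mp hB with ⟨hB1, hB2⟩
      exact ⟨1, by omega, of_decide_eq_true hB1, hB2⟩
    · omega
  obtain ⟨k, hk, hkle, hkP⟩ := hex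
  unfold pvHasSuf at hkP
  rw [show pvSuffixGroups = pvGroupByWordCount pvSuffixes from rfl,
    pv_group_contains, List.any_eq_true] at hkP
  obtain ⟨p, hpmem, hp⟩ := hkP
  rcases Bool.and_eq_true_iff.mp hp with ⟨hlenp, hjoin⟩
  cases words with
  | nil => simp at hkle; omega
  | cons w0 rest =>
    unfold pvASufCond
    rw [List.any_eq_true]
    refine ⟨p, hpmem, ?_⟩
    rw [beq_iff_eq.mp hlenp]
    unfold pvJoinTail at hjoin
    exact hjoin

-- the two prefix loops agree
lemma pv_pref_loops (n : Nat) : ∀ words : List String, words.length ≤ n →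
    pvAPrefLoop words = pvBPrefLoop words := by
  induction n with
  | zero =>
    intro words hlen
    have hnil : words = [] := by
      cases words with
      | nil => rfl
      | cons a l => simp at hlen
    subst hnil
    rw [pvAPrefLoop.eq_def, pvBPrefLoop.eq_def]
    simp [pvAPrefCond]
  | succ n ih =>
    intro words hlen
    cases words with
    | nil =>
      rw [pvAPrefLoop.eq_def, pvBPrefLoop.eq_def]
      simp [pvAPrefCond]
    | cons w0 rest =>
      by_cases hz : pvAPrefLongest (w0 :: rest) = 0
      · have hA : pvAPrefLoop (w0 :: rest) = (w0 :: rest) := by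
          rw [pvAPrefLoop.eq_def]
          split_ifs with h1 h2
          · exact absurd h2 (by omega)
          · rfl
          · rfl
        have hB : pvBPrefLoop (w0 :: rest) = (w0 :: rest) := by
          rw [pvBPrefLoop.eq_def, dif_neg (by simp : ¬((w0 :: rest).isEmpty = true))]
          split
          · next L hf =>
            rw [pv_find_pref_char _ (by simp), if_pos hz] at hf
            cases hf
          · rfl
        rw [hA, hB]
      · have hpos : 0 < pvAPrefLongest (w0 :: rest) := Nat.pos_of_ne_zero hz
        have hcond := pv_pref_cond_of_pos _ hpos
        rw [pvAPrefLoop.eq_def, pvBPrefLoop.eq_def, dif_pos hcond, dif_pos hpos,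
          dif_neg (by simp : ¬((w0 :: rest).isEmpty = true))]
        split
        · next L hf =>
          rw [pv_find_pref_char _ (by simp), if_neg hz] at hf
          injection hf with hL
          subst hL
          apply ih
          rw [PySem.List.slice_from_natCast]
          simp only [List.length_drop, List.length_cons]
          simp only [List.length_cons] at hlen
          omega
        · next hf =>
          rw [pv_find_pref_char _ (by simp), if_neg hz] at hf
          cases hf

lemma pv_suf_loops (n : Nat) : ∀ words : List String, words.length ≤ n →
    pvASufLoop words = pvBSufLoop words := by
  induction n with
  | zero =>
    intro words hlen
    have hnil : words = [] := by
      cases words with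
      | nil => rfl
      | cons a l => simp at hlen
    subst hnil
    rw [pvASufLoop.eq_def, pvBSufLoop.eq_def]
    simp [pvASufCond]
  | succ n ih =>
    intro words hlen
    cases words with
    | nil =>
      rw [pvASufLoop.eq_def, pvBSufLoop.eq_def]
      simp [pvASufCond]
    | cons w0 rest =>
      by_cases hz : pvASufLongest (w0 :: rest) = 0
      · have hA : pvASufLoop (w0 :: rest) = (w0 :: rest) := by
          rw [pvASufLoop.eq_def]
          split_ifs with h1 h2
          · exact absurd h2 (by omega)
          · rfl
          · rfl
        have hB : pvBSufLoop (w0 :: rest) = (w0 :: rest) := by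
          rw [pvBSufLoop.eq_def, dif_neg (by simp : ¬((w0 :: rest).isEmpty = true))]
          split
          · next L hf =>
            rw [pv_find_suf_char _ (by simp), if_pos hz] at hf
            cases hf
          · rfl
        rw [hA, hB]
      · have hpos : 0 < pvASufLongest (w0 :: rest) := Nat.pos_of_ne_zero hz
        have hcond := pv_suf_cond_of_pos _ hpos
        rw [pvASufLoop.eq_def, pvBSufLoop.eq_def, dif_pos hcond, dif_pos hpos,
          dif_neg (by simp : ¬((w0 :: rest).isEmpty = true))]
        split
        · next L hf =>
          rw [pv_find_suf_char _ (by simp), if_neg hz] at hf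
          injection hf with hL
          subst hL
          apply ih
          rw [PySem.List.slice_to_neg_natCast _ _ hpos]
          simp only [List.length_take, List.length_cons]
          simp only [List.length_cons] at hlen
          omega
        · next hf =>
          rw [pv_find_suf_char _ (by simp), if_neg hz] at hf
          cases hf

-- ===== VERDICT (by name: the statement is the Claim_ definition above) =====
lemma pv_pref_loop_eq (words : List String) : pvAPrefLoop words = pvBPrefLoop words :=
  pv_pref_loops words.length words le_rfl

lemma pv_suf_loop_eq (words : List String) : pvASufLoop words = pvBSufLoop words :=
  pv_suf_loops words.length words le_rfl

-- ===== VERDICT (by name: the statement is the Claim_ definition above) =====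
theorem extract_base_name_py_spec : Claim_equal_extract_base_name_py := by
  intro pokemon_name _
  unfold Spec_extract_base_name_py extract_base_name_py extract_base_name_py_alt
  simp only [pv_pref_loop_eq, pv_suf_loop_eq]
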